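-- pv_equiv track=rewrite | github.com/Tech-Flipspaces/Enterprise_Project_Analytics_Dashboard | backend/core/views.py | group_roles_by_dept
-- ===== SOURCE A (Python) =====
-- def group_roles_by_dept(flat_roles):
--     """
--         Helper: Groups a list of role names into specific Departments in a specific order for Dropdown menus.
--     """
--     groups = {
--         'Sales': ['Sales Head', 'Sales Lead'],
--         'Design': ['DH', 'DM', 'ID', '3D'],
--         'Operations': ['Cluster/BU Head', 'SPM/PM', 'SOM/OM', 'SS', 'CSC', 'MEP'],
--         'Purchase': ['Purchase Head', 'Purchase Manager', 'Purchase Executive'],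
--         'Marketing': ['Marketing Head', 'Marketing Lead'],
--         'Finance': ['Finance Head'],
--     }
--
--     # Create a result dict preserving the order above
--     ordered_result = {k: [] for k in groups}
--     ordered_result['Other'] = [] # Catch-all bucket
--
--     for role in flat_roles:
--         found = False
--         for dept, role_list in groups.items():
--             # Check if role matches exactly or contains the string
--             if role in role_list:
--                 ordered_result[dept].append(role)
--                 found = True
--                 break
--         if not found:
--             ordered_result['Other'].append(role)
--
--     # Remove empty departments and return
--     return {k: v for k, v in ordered_result.items() if v}
-- ===== SOURCE B (Python) =====
-- def group_roles_by_dept(flat_roles):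
--     """
--         Helper: Groups a list of role names into specific Departments in a specific order for Dropdown menus.
--     """
--     groups = {
--         'Sales': ['Sales Head', 'Sales Lead'],
--         'Design': ['DH', 'DM', 'ID', '3D'],
--         'Operations': ['Cluster/BU Head', 'SPM/PM', 'SOM/OM', 'SS', 'CSC', 'MEP'],
--         'Purchase': ['Purchase Head', 'Purchase Manager', 'Purchase Executive'],
--         'Marketing': ['Marketing Head', 'Marketing Lead'],
--         'Finance': ['Finance Head'],
--     }
--
--     # Reverse index: role name -> its department (built once, dept order preserved)
--     reverse = {role: dept for dept, role_list in groups.items() for role in role_list}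
--
--     # Ordered result skeleton
--     result = {k: [] for k in groups}
--     result['Other'] = []
--
--     # Single pass: one O(1) lookup per role instead of an inner scan
--     for role in flat_roles:
--         result[reverse.get(role, 'Other')].append(role)
--
--     # Remove empty departments and return
--     return {k: v for k, v in result.items() if v}
-- ===== Notes on version B (the rewrite author's own statement) =====
-- stated objective: faster
-- what changed: Replaces the per-role inner scan over all department role lists with a reverse index dict (role -> department) built once, so each role is bucketed with a single dict lookup.
import Mathlib
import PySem

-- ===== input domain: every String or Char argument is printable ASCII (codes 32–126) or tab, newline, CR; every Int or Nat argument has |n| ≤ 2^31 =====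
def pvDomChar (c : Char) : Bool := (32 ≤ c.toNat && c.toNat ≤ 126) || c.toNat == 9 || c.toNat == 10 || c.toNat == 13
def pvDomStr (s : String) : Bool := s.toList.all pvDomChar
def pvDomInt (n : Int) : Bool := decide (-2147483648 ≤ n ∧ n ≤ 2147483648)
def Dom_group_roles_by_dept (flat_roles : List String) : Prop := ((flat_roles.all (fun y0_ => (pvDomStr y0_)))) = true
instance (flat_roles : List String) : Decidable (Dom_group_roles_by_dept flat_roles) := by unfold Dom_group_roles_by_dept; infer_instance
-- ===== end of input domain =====

-- B replaces A's inner scan over all department role lists with a reverse index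
-- (role -> department) built once, then a single lookup per role.

-- the fixed groups dict literal (shared by both Pythons, in the same order)
def grbdGroups : PySem.Dict String (List String) := PySem.Dict.ofList
  [ ("Sales", ["Sales Head", "Sales Lead"]),
    ("Design", ["DH", "DM", "ID", "3D"]),
    ("Operations", ["Cluster/BU Head", "SPM/PM", "SOM/OM", "SS", "CSC", "MEP"]),
    ("Purchase", ["Purchase Head", "Purchase Manager", "Purchase Executive"]),
    ("Marketing", ["Marketing Head", "Marketing Lead"]),
    ("Finance", ["Finance Head"]) ]

-- ===== PORT A =====
-- A's inner 'for dept, role_list in groups.items(): if role in role_list: append; break'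
def grbdInnerA (role : String) (items : List (String × List String))
    (d : PySem.Dict String (List String)) : PySem.Dict String (List String) × Bool :=
  match items with
  | [] => (d, false)
  | (dept, role_list) :: rest =>
    if role_list.contains role then (d.modify dept [] (· ++ [role]), true)
    else grbdInnerA role rest d

def group_roles_by_dept (flat_roles : List String) : List (String × List String) :=
  let groups := grbdGroups
  let ordered0 := PySem.Dict.ofList (groups.keys.map (fun k => (k, ([] : List String))))
  let ordered := ordered0.insert "Other" []
  let final := flat_roles.foldl (fun d role =>
    let (d', found) := grbdInnerA role groups.items d
    if !found then d'.modify "Other" [] (· ++ [role]) else d') ordered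
  final.items.filter (fun p => !p.2.isEmpty)

-- ===== PORT B =====
def group_roles_by_dept_alt (flat_roles : List String) : List (String × List String) :=
  let groups := grbdGroups
  let reverse := PySem.Dict.ofList
    (groups.items.flatMap (fun p => p.2.map (fun role => (role, p.1))))
  let result0 := PySem.Dict.ofList (groups.keys.map (fun k => (k, ([] : List String))))
  let result := result0.insert "Other" []
  let final := flat_roles.foldl (fun d role =>
    d.modify (reverse.getD role "Other") [] (· ++ [role])) result
  final.items.filter (fun p => !p.2.isEmpty)

-- ===== PRECONDITION & SPEC =====
def Spec_group_roles_by_dept (flat_roles : List String) (out : List (String × List String)) : Prop := out = group_roles_by_dept_alt flat_roles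
instance (flat_roles : List String) (out : List (String × List String)) : Decidable (Spec_group_roles_by_dept flat_roles out) := by unfold Spec_group_roles_by_dept; infer_instance

-- ===== CLAIM (what is proved, stated in full; the proofs are below) =====
def Claim_equal_group_roles_by_dept : Prop := ∀ (flat_roles : List String), Dom_group_roles_by_dept flat_roles → Spec_group_roles_by_dept flat_roles (group_roles_by_dept flat_roles)

-- ===== LEMMAS AND PROOFS =====
-- Per-role step equality: A's inner scan and B's reverse-index lookup update the dict identically.
theorem grbd_step_eq (d : PySem.Dict String (List String)) (role : String) :
    (let p := grbdInnerA role grbdGroups.items d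
     if !p.2 then p.1.modify "Other" [] (· ++ [role]) else p.1) =
    d.modify ((PySem.Dict.ofList
      (grbdGroups.items.flatMap (fun p => p.2.map (fun role => (role, p.1))))).getD role "Other")
      [] (· ++ [role]) := by
  by_cases h1 : role = "Sales Head"; · subst h1; rfl
  by_cases h2 : role = "Sales Lead"; · subst h2; rfl
  by_cases h3 : role = "DH"; · subst h3; rfl
  by_cases h4 : role = "DM"; · subst h4; rfl
  by_cases h5 : role = "ID"; · subst h5; rfl
  by_cases h6 : role = "3D"; · subst h6; rfl
  by_cases h7 : role = "Cluster/BU Head"; · subst h7; rfl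
  by_cases h8 : role = "SPM/PM"; · subst h8; rfl
  by_cases h9 : role = "SOM/OM"; · subst h9; rfl
  by_cases h10 : role = "SS"; · subst h10; rfl
  by_cases h11 : role = "CSC"; · subst h11; rfl
  by_cases h12 : role = "MEP"; · subst h12; rfl
  by_cases h13 : role = "Purchase Head"; · subst h13; rfl
  by_cases h14 : role = "Purchase Manager"; · subst h14; rfl
  by_cases h15 : role = "Purchase Executive"; · subst h15; rfl
  by_cases h16 : role = "Marketing Head"; · subst h16; rfl
  by_cases h17 : role = "Marketing Lead"; · subst h17; rfl
  by_cases h18 : role = "Finance Head"; · subst h18; rfl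
  have e1 : (role == "Sales Head") = false := beq_eq_false_iff_ne.mpr h1
  have f1 : ("Sales Head" == role) = false := beq_eq_false_iff_ne.mpr (Ne.symm h1)
  have e2 : (role == "Sales Lead") = false := beq_eq_false_iff_ne.mpr h2
  have f2 : ("Sales Lead" == role) = false := beq_eq_false_iff_ne.mpr (Ne.symm h2)
  have e3 : (role == "DH") = false := beq_eq_false_iff_ne.mpr h3
  have f3 : ("DH" == role) = false := beq_eq_false_iff_ne.mpr (Ne.symm h3)
  have e4 : (role == "DM") = false := beq_eq_false_iff_ne.mpr h4
  have f4 : ("DM" == role) = false := beq_eq_false_iff_ne.mpr (Ne.symm h4)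
  have e5 : (role == "ID") = false := beq_eq_false_iff_ne.mpr h5
  have f5 : ("ID" == role) = false := beq_eq_false_iff_ne.mpr (Ne.symm h5)
  have e6 : (role == "3D") = false := beq_eq_false_iff_ne.mpr h6
  have f6 : ("3D" == role) = false := beq_eq_false_iff_ne.mpr (Ne.symm h6)
  have e7 : (role == "Cluster/BU Head") = false := beq_eq_false_iff_ne.mpr h7
  have f7 : ("Cluster/BU Head" == role) = false := beq_eq_false_iff_ne.mpr (Ne.symm h7)
  have e8 : (role == "SPM/PM") = false := beq_eq_false_iff_ne.mpr h8
  have f8 : ("SPM/PM" == role) = false := beq_eq_false_iff_ne.mpr (Ne.symm h8)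
  have e9 : (role == "SOM/OM") = false := beq_eq_false_iff_ne.mpr h9
  have f9 : ("SOM/OM" == role) = false := beq_eq_false_iff_ne.mpr (Ne.symm h9)
  have e10 : (role == "SS") = false := beq_eq_false_iff_ne.mpr h10
  have f10 : ("SS" == role) = false := beq_eq_false_iff_ne.mpr (Ne.symm h10)
  have e11 : (role == "CSC") = false := beq_eq_false_iff_ne.mpr h11
  have f11 : ("CSC" == role) = false := beq_eq_false_iff_ne.mpr (Ne.symm h11)
  have e12 : (role == "MEP") = false := beq_eq_false_iff_ne.mpr h12
  have f12 : ("MEP" == role) = false := beq_eq_false_iff_ne.mpr (Ne.symm h12)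
  have e13 : (role == "Purchase Head") = false := beq_eq_false_iff_ne.mpr h13
  have f13 : ("Purchase Head" == role) = false := beq_eq_false_iff_ne.mpr (Ne.symm h13)
  have e14 : (role == "Purchase Manager") = false := beq_eq_false_iff_ne.mpr h14
  have f14 : ("Purchase Manager" == role) = false := beq_eq_false_iff_ne.mpr (Ne.symm h14)
  have e15 : (role == "Purchase Executive") = false := beq_eq_false_iff_ne.mpr h15
  have f15 : ("Purchase Executive" == role) = false := beq_eq_false_iff_ne.mpr (Ne.symm h15)
  have e16 : (role == "Marketing Head") = false := beq_eq_false_iff_ne.mpr h16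
  have f16 : ("Marketing Head" == role) = false := beq_eq_false_iff_ne.mpr (Ne.symm h16)
  have e17 : (role == "Marketing Lead") = false := beq_eq_false_iff_ne.mpr h17
  have f17 : ("Marketing Lead" == role) = false := beq_eq_false_iff_ne.mpr (Ne.symm h17)
  have e18 : (role == "Finance Head") = false := beq_eq_false_iff_ne.mpr h18
  have f18 : ("Finance Head" == role) = false := beq_eq_false_iff_ne.mpr (Ne.symm h18)
  simp [grbdGroups, grbdInnerA, PySem.Dict.ofList, PySem.Dict.getD, PySem.Dict.get?,
    PySem.Dict.update, PySem.Dict.insert, PySem.Dict.contains, PySem.Dict.empty,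
    List.find?, List.contains, List.elem, e1, f1, e2, f2, e3, f3, e4, f4, e5, f5, e6, f6, e7, f7, e8, f8, e9, f9, e10, f10, e11, f11, e12, f12, e13, f13, e14, f14, e15, f15, e16, f16, e17, f17, e18, f18]

-- The two role loops compute the same dict.
theorem grbd_fold_eq (l : List String) (d : PySem.Dict String (List String)) :
    l.foldl (fun d role =>
      match grbdInnerA role grbdGroups.items d with
      | (d', found) => if !found then d'.modify "Other" [] (· ++ [role]) else d') d =
    l.foldl (fun d role =>
      d.modify ((PySem.Dict.ofList
        (grbdGroups.items.flatMap (fun p => p.2.map (fun role => (role, p.1))))).getD role "Other")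
        [] (· ++ [role])) d := by
  induction l generalizing d with
  | nil => rfl
  | cons x xs ih =>
    simp only [List.foldl_cons]
    rw [ih]
    congr 1
    exact grbd_step_eq d x

-- ===== VERDICT (by name: the statement is the Claim_ definition above) =====
theorem group_roles_by_dept_spec : Claim_equal_group_roles_by_dept := by
  intro flat_roles _
  unfold Spec_group_roles_by_dept
  simp only [group_roles_by_dept, group_roles_by_dept_alt]
  rw [grbd_fold_eq]
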